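-- pv_equiv track=rewrite | github.com/mission-learning/Algorithms | Greedy algorithms/Finding zero to replace in order to find longest 1s subsequence.py | find_index_zero
-- ===== SOURCE A (Python) =====
-- def find_index_zero(A):
--
--     max_count = 0
--     index = -1
--
--     prev_index = -1
--     count = 0
--
--     for i in range (len(A)):
--         if A[i] == 1:
--             count+=1
--
--         else:
--             count = i - prev_index
--             prev_index = i
--
--         if count > max_count:
--             max_count = count
--             index = prev_index
--
--     return index
-- ===== SOURCE B (Python) =====
-- def find_index_zero(A):
--     n = len(A)
--     zeros = [i for i, x in enumerate(A) if x != 1]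
--     best = -1
--     maxw = 0
--     prev = -1
--     for k in range(len(zeros)):
--         nxt = zeros[k + 1] if k + 1 < len(zeros) else n
--         w = nxt - prev - 1
--         if w > maxw:
--             maxw = w
--             best = zeros[k]
--         prev = zeros[k]
--     return best
-- ===== Notes on version B (the rewrite author's own statement) =====
-- stated objective: alternative
-- what changed: Replaces A's single running scan (carrying max_count/index/prev_index/count) by a two-phase computation: first collect the indices of all non-1 entries, then maximize the window nxt - prev - 1 between consecutive such indices (with implicit -1/len(A) boundaries), keeping the earliest index under a strict '>' comparison.
import Mathlib
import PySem

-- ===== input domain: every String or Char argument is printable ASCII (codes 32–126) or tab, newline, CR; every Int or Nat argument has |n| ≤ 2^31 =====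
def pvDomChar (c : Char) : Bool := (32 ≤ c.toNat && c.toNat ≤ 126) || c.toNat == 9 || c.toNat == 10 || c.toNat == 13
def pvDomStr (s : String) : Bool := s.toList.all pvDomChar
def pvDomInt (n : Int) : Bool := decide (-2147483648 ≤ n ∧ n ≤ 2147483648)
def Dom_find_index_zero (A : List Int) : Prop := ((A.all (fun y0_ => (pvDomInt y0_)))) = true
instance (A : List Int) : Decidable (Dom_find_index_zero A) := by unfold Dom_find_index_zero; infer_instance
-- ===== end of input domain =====

-- B rewrites the single running scan as: collect the indices of the non-1 entries, then
-- take the max of the windows between consecutive such indices ('alternative' objective).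

-- ===== PORT A =====
-- literal transliteration of A: one fold over range(len(A)) carrying
-- (max_count, index, prev_index, count)
def find_index_zero (A : List Int) : Int :=
  let s :=
    (PySem.List.pyRange 0 (A.length : Int) 1).foldl
      (fun (st : Int × Int × Int × Int) (i : Int) =>
        let pc : Int × Int :=
          if PySem.List.pyGetD A i 0 = 1 then (st.2.2.1, st.2.2.2 + 1)
          else (i, i - st.2.2.1)
        if pc.2 > st.1 then (pc.2, pc.1, pc.1, pc.2) else (st.1, st.2.1, pc.1, pc.2))
      (0, -1, -1, 0)
  s.2.1

-- ===== PORT B =====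
-- zeros = [i for i, x in enumerate(A) if x != 1]
def fizZeros (A : List Int) : List Int :=
  (PySem.List.enumerate A 0).filterMap (fun p => if p.2 ≠ 1 then some p.1 else none)

-- the for-k loop of Source B: walks the zeros list, nxt = next zero if any else n
def fizLoop (n : Int) : List Int → Int → Int → Int → Int
  | [], best, _maxw, _prev => best
  | z :: rest, best, maxw, prev =>
    let nxt : Int := match rest with | [] => n | z' :: _ => z'
    let w := nxt - prev - 1
    if w > maxw then fizLoop n rest z w z else fizLoop n rest best maxw z

def find_index_zero_alt (A : List Int) : Int :=
  fizLoop (A.length : Int) (fizZeros A) (-1) 0 (-1)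

-- ===== PRECONDITION & SPEC =====
def Spec_find_index_zero (A : List Int) (out : Int) : Prop := out = find_index_zero_alt A
instance (A : List Int) (out : Int) : Decidable (Spec_find_index_zero A out) := by unfold Spec_find_index_zero; infer_instance

-- ===== CLAIM (what is proved, stated in full; the proofs are below) =====
def Claim_equal_find_index_zero : Prop := ∀ (A : List Int), Dom_find_index_zero A → Spec_find_index_zero A (find_index_zero A)

-- ===== LEMMAS AND PROOFS =====

-- A's loop step, named for the proofs
def fizStepA (st : Int × Int × Int × Int) (i x : Int) : Int × Int × Int × Int :=
  let pc : Int × Int := if x = 1 then (st.2.2.1, st.2.2.2 + 1) else (i, i - st.2.2.1)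
  if pc.2 > st.1 then (pc.2, pc.1, pc.1, pc.2) else (st.1, st.2.1, pc.1, pc.2)

-- A's full loop state
def fizSA (A : List Int) : Int × Int × Int × Int :=
  (PySem.List.pyRange 0 (A.length : Int) 1).foldl
    (fun st i => fizStepA st i (PySem.List.pyGetD A i 0)) (0, -1, -1, 0)

theorem find_index_zero_eq_SA (A : List Int) : find_index_zero A = (fizSA A).2.1 := rfl

-- B's loop state just before its last element, whose successor is z
def fizPre (z : Int) : List Int → Int → Int → Int → Int × Int × Int
  | [], best, maxw, prev => (best, maxw, prev)
  | w :: rest, best, maxw, prev =>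
    let nxt : Int := match rest with | [] => z | w' :: _ => w'
    let wd := nxt - prev - 1
    if wd > maxw then fizPre z rest w wd w else fizPre z rest best maxw w

theorem fizLoop_concat (n : Int) (ws : List Int) : ∀ (z best maxw prev : Int),
    fizLoop n (ws ++ [z]) best maxw prev =
      (let st := fizPre z ws best maxw prev
       if n - st.2.2 - 1 > st.2.1 then z else st.1) := by
  induction ws with
  | nil => intro z best maxw prev; simp [fizLoop, fizPre]
  | cons w rest ih =>
    intro z best maxw prev
    cases rest with
    | nil =>
      simp only [List.cons_append, List.nil_append, fizLoop, fizPre]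
      split <;> exact ih _ _ _ _
    | cons w' rest' =>
      simp only [List.cons_append, fizLoop, fizPre]
      split <;> exact ih _ _ _ _

theorem fizPre_concat (y : Int) (ws : List Int) : ∀ (z best maxw prev : Int),
    fizPre y (ws ++ [z]) best maxw prev =
      (let st := fizPre z ws best maxw prev
       let wd := y - st.2.2 - 1
       if wd > st.2.1 then (z, wd, z) else (st.1, st.2.1, z)) := by
  induction ws with
  | nil =>
    intro z best maxw prev
    simp only [List.nil_append, fizPre]
  | cons w rest ih =>
    intro z best maxw prev
    cases rest with
    | nil =>
      simp only [List.cons_append, List.nil_append, fizPre]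
      split <;> exact ih _ _ _ _
    | cons w' rest' =>
      simp only [List.cons_append, fizPre]
      split <;> exact ih _ _ _ _

theorem enumerate_append_singleton (xs : List Int) (x : Int) : ∀ (s : Int),
    PySem.List.enumerate (xs ++ [x]) s = PySem.List.enumerate xs s ++ [((s + xs.length : Int), x)] := by
  induction xs with
  | nil => intro s; simp [PySem.List.enumerate_cons, PySem.List.enumerate_nil]
  | cons y ys ih =>
    intro s
    simp only [List.cons_append, PySem.List.enumerate_cons, ih (s + 1), List.length_cons]
    have : s + 1 + (ys.length : Int) = s + ((ys.length : Int) + 1) := by ring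
    rw [this]
    push_cast
    rfl

theorem fizZeros_append (A : List Int) (x : Int) :
    fizZeros (A ++ [x]) = fizZeros A ++ (if x ≠ 1 then [(A.length : Int)] else []) := by
  simp only [fizZeros, enumerate_append_singleton, List.filterMap_append]
  congr 1
  split <;> simp_all [List.filterMap]

theorem fizSA_append (A : List Int) (x : Int) :
    fizSA (A ++ [x]) = fizStepA (fizSA A) (A.length : Int) x := by
  have hlen : ((A ++ [x]).length : Int) = (A.length : Int) + 1 := by simp
  rw [fizSA, hlen, PySem.List.pyRange_one_succ_right (by positivity), List.foldl_append]
  simp only [List.foldl_cons, List.foldl_nil]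
  have h1 : List.foldl (fun st i => fizStepA st i (PySem.List.pyGetD (A ++ [x]) i 0)) (0, -1, -1, 0)
      (PySem.List.pyRange 0 (A.length : Int)) = fizSA A := by
    rw [fizSA]
    apply PySem.List.foldl_congr_mem
    intro acc i hi
    rw [PySem.List.mem_pyRange_one] at hi
    have hi1 : i < ((A ++ [x]).length : Int) := by simp; omega
    rw [PySem.List.pyGetD_eq_getElem _ _ hi.1 hi1,
        PySem.List.pyGetD_eq_getElem _ _ hi.1 (by exact_mod_cast hi.2),
        List.getElem_append_left]
  have h2 : PySem.List.pyGetD (A ++ [x]) (A.length : Int) 0 = x := by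
    rw [PySem.List.pyGetD_eq_getElem _ _ (by positivity) (by simp)]
    simp
  rw [h1, h2]

-- the main invariant: A's running state, expressed through B's zeros list
theorem fiz_invariant (A : List Int) :
    (fizZeros A = [] → fizSA A = ((A.length : Int), -1, -1, (A.length : Int))) ∧
    (∀ ws z, fizZeros A = ws ++ [z] →
      fizSA A =
        (let st := fizPre z ws (-1) 0 (-1)
         let c := (A.length : Int) - 1 - st.2.2
         if c > st.2.1 then (c, z, z, c) else (st.2.1, st.1, z, c))) := by
  induction A using List.reverseRecOn with
  | nil =>
    constructor
    · intro _; decide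
    · intro ws z h; simp [fizZeros, PySem.List.enumerate_nil] at h
  | append_singleton A x ih =>
    obtain ⟨ih0, ih1⟩ := ih
    have hlen : (((A ++ [x]).length : Nat) : Int) = (A.length : Int) + 1 := by
      rw [List.length_append]; push_cast; simp
    rw [fizSA_append, fizZeros_append]
    by_cases hx : x = 1
    · subst hx
      simp only [ne_eq, not_true_eq_false, if_false, List.append_nil]
      constructor
      · intro h
        rw [ih0 h, hlen]
        simp only [fizStepA]
        norm_num
      · intro ws z h
        rcases hst : fizPre z ws (-1) 0 (-1) with ⟨b, mv, p⟩
        have hA := ih1 ws z h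
        simp only [hst] at hA ⊢
        rw [hA, hlen]
        simp only [fizStepA]
        split_ifs <;> simp only [Prod.mk.injEq, true_and] at * <;> omega
    · simp only [ne_eq, hx, not_false_eq_true, if_true]
      constructor
      · intro h; simp at h
      · intro ws z h
        obtain ⟨hws, hzz⟩ := List.append_inj' h rfl
        have hz : z = (A.length : Int) := by simpa using hzz.symm
        subst hz
        rcases List.eq_nil_or_concat (fizZeros A) with h0 | ⟨ws0, z0, hcat⟩
        · have hws0 : ws = [] := by rw [← hws, h0]
          subst hws0
          rw [ih0 h0, hlen]
          have hn : (0:Int) ≤ (A.length : Int) := Int.natCast_nonneg _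
          simp only [fizPre, fizStepA, if_neg hx]
          split_ifs <;> simp only [Prod.mk.injEq, true_and] at * <;> omega
        · rw [List.concat_eq_append] at hcat
          have hws0 : ws = ws0 ++ [z0] := by rw [← hws, hcat]
          subst hws0
          rcases hst : fizPre z0 ws0 (-1) 0 (-1) with ⟨b, mv, p⟩
          have hA := ih1 ws0 z0 hcat
          simp only [hst] at hA
          rw [hA, hlen, fizPre_concat]
          simp only [hst, fizStepA, if_neg hx]
          split_ifs <;> simp only [Prod.mk.injEq, true_and] at * <;> omega

-- ===== VERDICT (by name: the statement is the Claim_ definition above) =====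
theorem find_index_zero_spec : Claim_equal_find_index_zero := by
  intro A _
  unfold Spec_find_index_zero
  rw [find_index_zero_eq_SA]
  unfold find_index_zero_alt
  rcases List.eq_nil_or_concat (fizZeros A) with h0 | ⟨ws, z, hcat⟩
  · rw [(fiz_invariant A).1 h0, h0]
    rfl
  · rw [List.concat_eq_append] at hcat
    have hA := (fiz_invariant A).2 ws z hcat
    rcases hst : fizPre z ws (-1) 0 (-1) with ⟨b, mv, p⟩
    simp only [hst] at hA
    rw [hA, hcat, fizLoop_concat]
    simp only [hst]
    split_ifs <;> first | rfl | omega
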